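-- pv_equiv track=rewrite | github.com/sora81dev/Contest | ARC173/a_nc.py | generate_neq_numbers
-- ===== SOURCE A (Python) =====
-- def is_neq_number(x):
--     s = str(x)
--     for i in range(len(s) - 1):
--         if s[i] == s[i + 1]:
--             return False
--     return True
--
-- def generate_neq_numbers(k):
--     count = 0
--     i = 1
--     while count < k:
--         if is_neq_number(i):
--             count += 1
--         i += 1
--     return i - 1
-- ===== SOURCE B (Python) =====
-- def generate_neq_numbers(k):
--     # Digit-DP: there are exactly 9**L numbers of length L with no two adjacent
--     # equal digits; pick the length, then build the k-th digit by digit.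
--     if k <= 0:
--         return 0
--     L = 1
--     while k > 9 ** L:
--         k -= 9 ** L
--         L += 1
--     idx = k - 1  # 0-based rank among the L-digit neq numbers
--     n = 0
--     prev = 0  # 0 also rules out a leading zero
--     for p in range(L - 1, -1, -1):
--         c, idx = divmod(idx, 9 ** p)
--         d = c if c < prev else c + 1
--         n = 10 * n + d
--         prev = d
--     return n
-- ===== Notes on version B (the rewrite author's own statement) =====
-- stated objective: faster
-- what changed: Replaces the scan that tests every integer 1,2,3,... until the k-th no-adjacent-equal-digits number is reached with a combinatorial unranking: there are 9^L such numbers of each length L, so B picks the length by subtracting block counts and then constructs the k-th number digit by digit from the base-9 expansion of its rank.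
import Mathlib
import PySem

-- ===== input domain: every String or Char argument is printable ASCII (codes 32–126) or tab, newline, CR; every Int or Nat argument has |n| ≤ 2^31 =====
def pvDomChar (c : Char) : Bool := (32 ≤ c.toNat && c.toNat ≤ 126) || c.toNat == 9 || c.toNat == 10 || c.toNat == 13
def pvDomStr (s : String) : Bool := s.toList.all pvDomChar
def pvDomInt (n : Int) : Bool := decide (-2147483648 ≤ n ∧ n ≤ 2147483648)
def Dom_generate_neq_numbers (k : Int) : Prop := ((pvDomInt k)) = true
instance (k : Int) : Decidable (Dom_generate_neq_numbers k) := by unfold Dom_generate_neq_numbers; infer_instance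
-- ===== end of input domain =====

-- B replaces A's one-by-one scan over all integers by combinatorial unranking
-- (9^L numbers of each length L, built digit by digit); objective: faster.

-- ===== PORT A =====
-- A-side helpers. `NQ n` is the mathematical "no two adjacent equal decimal digits"
-- predicate; `nnI i` is the least such positive number ≥ i.  They are needed only
-- for the termination measure of A's while-loop (`loopA`), not for its values.
def NQ (n : ℕ) : Bool := decide ((Nat.digits 10 n).IsChain (· ≠ ·))

-- an alternating-digits number of any requested size, witnessing that NQ-numbers are unbounded
def altDig : ℕ → ℕ → List ℕ
  | 0, d => [d]
  | m + 1, d => d :: altDig m (3 - d)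

theorem altDig_head (m : ℕ) (d : ℕ) : (altDig m d).head? = some d := by
  cases m <;> simp [altDig]

theorem altDig_facts (m : ℕ) : ∀ d, (d = 1 ∨ d = 2) →
    (∀ x ∈ altDig m d, x = 1 ∨ x = 2) ∧ (altDig m d).IsChain (· ≠ ·) ∧
    m + 1 ≤ Nat.ofDigits 10 (altDig m d) := by
  induction m with
  | zero =>
    intro d hd
    refine ⟨by simpa [altDig] using hd, by simp [altDig], ?_⟩
    simp [altDig]; omega
  | succ m ih =>
    intro d hd
    have hd' : 3 - d = 1 ∨ 3 - d = 2 := by omega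
    obtain ⟨ih1, ih2, ih3⟩ := ih (3 - d) hd'
    refine ⟨?_, ?_, ?_⟩
    · intro x hx
      rcases List.mem_cons.mp hx with h | h
      · omega
      · exact ih1 x h
    · rw [show altDig (m + 1) d = d :: altDig m (3 - d) from rfl, List.isChain_cons]
      refine ⟨?_, ih2⟩
      intro y hy
      rw [altDig_head] at hy
      simp at hy
      omega
    · rw [show altDig (m + 1) d = d :: altDig m (3 - d) from rfl, Nat.ofDigits_cons]
      omega

theorem exNeq (i : ℤ) : ∃ j : ℕ, i ≤ (j : ℤ) ∧ 0 < j ∧ NQ j = true := by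
  obtain ⟨h1, h2, h3⟩ := altDig_facts i.toNat 1 (Or.inl rfl)
  refine ⟨Nat.ofDigits 10 (altDig i.toNat 1), ?_, by omega, ?_⟩
  · calc i ≤ (i.toNat : ℤ) := Int.self_le_toNat i
      _ ≤ _ := by exact_mod_cast Nat.le_of_succ_le h3
  · have hd : Nat.digits 10 (Nat.ofDigits 10 (altDig i.toNat 1)) = altDig i.toNat 1 := by
      apply Nat.digits_ofDigits 10 (by omega)
      · intro x hx; rcases h1 x hx with h | h <;> omega
      · intro hne
        have := h1 _ (List.getLast_mem hne)
        omega
    unfold NQ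
    rw [hd]
    simpa using h2

def nnI (i : ℤ) : ℕ := Nat.find (exNeq i)

-- the index loop of is_neq_number: `for i in range(len(s)-1): if s[i] == s[i+1]: return False`
def isNeqLoop (cs : List Char) : List Int → Bool
  | [] => true
  | i :: rest =>
    if PySem.List.pyGet? cs i == PySem.List.pyGet? cs (i + 1) then false
    else isNeqLoop cs rest

def is_neq_number (x : Int) : Bool :=
  let s := PySem.Int.toStr x
  isNeqLoop s.toList (PySem.List.pyRange 0 (PySem.Str.len s - 1) 1)

-- bridge: the port's string test agrees with NQ on positive inputs
theorem toDigitsCore_eq (fuel : ℕ) : ∀ (n : ℕ) (ds : List Char), 0 < n → n < fuel →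
    Nat.toDigitsCore 10 fuel n ds = ((Nat.digits 10 n).map Nat.digitChar).reverse ++ ds := by
  induction fuel with
  | zero => intro n ds h1 h2; omega
  | succ f ih =>
    intro n ds h1 h2
    rw [Nat.toDigitsCore]
    by_cases h : n / 10 = 0
    · have hd : Nat.digits 10 n = [n % 10] := by
        rw [Nat.digits_def' (by norm_num : (1:ℕ) < 10) h1, h]
        simp
      simp [h, hd]
    · have hlt : n / 10 < f := by
        have := Nat.div_lt_self h1 (by norm_num : 1 < 10)
        omega
      have hpos : 0 < n / 10 := Nat.pos_of_ne_zero h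
      simp only [h, if_neg, ite_false]
      rw [ih (n / 10) _ hpos hlt]
      rw [Nat.digits_def' (by norm_num : (1:ℕ) < 10) h1]
      simp

theorem toChars_pos (x : ℤ) (hx : 1 ≤ x) :
    PySem.Int.toChars x = ((Nat.digits 10 x.toNat).map Nat.digitChar).reverse := by
  unfold PySem.Int.toChars
  rw [if_neg (by omega)]
  unfold Nat.toDigits
  rw [toDigitsCore_eq _ _ _ (by omega) (by omega), List.append_nil]

theorem isNeqLoop_spec (cs : List Char) : ∀ (m j : ℕ), m = cs.length - 1 - j →
    (isNeqLoop cs (PySem.List.pyRange j ((cs.length : ℤ) - 1) 1) = true ↔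
      ∀ t : ℕ, j ≤ t → t + 1 < cs.length → cs[t]? ≠ cs[t + 1]?) := by
  intro m
  induction m with
  | zero =>
    intro j hj
    rw [PySem.List.pyRange_one_eq_nil (by omega)]
    simp only [isNeqLoop]
    constructor
    · intro _ t ht htl
      omega
    · intro _; trivial
  | succ m ih =>
    intro j hj
    have hjl : (j : ℤ) < (cs.length : ℤ) - 1 := by omega
    rw [PySem.List.pyRange_one_cons hjl]
    simp only [isNeqLoop]
    rw [show ((j : ℤ) + 1) = ((j + 1 : ℕ) : ℤ) by push_cast; ring]
    rw [PySem.List.pyGet?_natCast, PySem.List.pyGet?_natCast]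
    by_cases hc : cs[j]? = cs[(j + 1 : ℕ)]?
    · rw [if_pos (by simp [hc])]
      constructor
      · intro h; exact absurd h (by simp)
      · intro hall
        exact absurd hc (hall j le_rfl (by omega))
    · rw [if_neg (by simp [hc])]
      rw [ih (j + 1) (by omega)]
      constructor
      · intro h t ht htl
        rcases Nat.eq_or_lt_of_le ht with h' | h'
        · rw [← h']; exact hc
        · exact h t h' htl
      · intro h t ht htl
        exact h t (by omega) htl

theorem is_neq_chain (x : Int) :
    is_neq_number x = true ↔ (PySem.Int.toChars x).IsChain (· ≠ ·) := by
  show isNeqLoop (PySem.Int.toStr x).toList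
      (PySem.List.pyRange 0 (PySem.Str.len (PySem.Int.toStr x) - 1) 1) = true ↔ _
  rw [PySem.Str.len_eq, PySem.Int.toList_toStr]
  have hs := isNeqLoop_spec (PySem.Int.toChars x) ((PySem.Int.toChars x).length - 1 - 0) 0 rfl
  norm_num at hs
  rw [hs, List.isChain_iff_getElem]
  constructor
  · intro h i hi
    have h2 := h i hi
    rw [List.getElem?_eq_getElem (by omega : i < (PySem.Int.toChars x).length),
      List.getElem?_eq_getElem hi] at h2
    intro he
    exact h2 (by rw [he])
  · intro h t htl
    rw [List.getElem?_eq_getElem (by omega : t < (PySem.Int.toChars x).length),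
      List.getElem?_eq_getElem htl]
    intro he
    exact h t htl (Option.some.inj he)

theorem digitChar_inj : ∀ a, a < 10 → ∀ b, b < 10 →
    (Nat.digitChar a = Nat.digitChar b ↔ a = b) := by decide

theorem is_neq_NQ (x : Int) (hx : 1 ≤ x) : is_neq_number x = true ↔ NQ x.toNat = true := by
  rw [is_neq_chain, toChars_pos x hx]
  unfold NQ
  rw [decide_eq_true_iff]
  rw [List.isChain_reverse, List.isChain_map]
  rw [List.isChain_iff_getElem, List.isChain_iff_getElem]
  constructor
  · intro h i hi
    have h2 := h i hi
    intro he
    exact h2 (by rw [he])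
  · intro h i hi
    have h2 := h i hi
    have d1 : (Nat.digits 10 x.toNat)[i] < 10 :=
      Nat.digits_lt_base (by norm_num) (List.getElem_mem _)
    have d2 : (Nat.digits 10 x.toNat)[i + 1] < 10 :=
      Nat.digits_lt_base (by norm_num) (List.getElem_mem _)
    intro he
    exact h2 ((digitChar_inj _ d2 _ d1).mp he).symm

theorem nnI_spec (i : ℤ) : i ≤ (nnI i : ℤ) ∧ 0 < nnI i ∧ NQ (nnI i) = true :=
  ⟨(Nat.find_spec (exNeq i)).1, (Nat.find_spec (exNeq i)).2.1, (Nat.find_spec (exNeq i)).2.2⟩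

theorem nnI_min (i : ℤ) (j : ℕ) (h1 : i ≤ (j : ℤ)) (h2 : 0 < j) (h3 : NQ j = true) :
    nnI i ≤ j :=
  Nat.find_min' (exNeq i) ⟨h1, h2, h3⟩

theorem nnI_ge (i : ℤ) : i ≤ (nnI i : ℤ) :=
  (nnI_spec i).1

theorem nnI_gt (i : ℤ) (h : ¬ (1 ≤ i ∧ NQ i.toNat = true)) : i < (nnI i : ℤ) := by
  rcases lt_or_eq_of_le (nnI_ge i) with h' | h'
  · exact h'
  · exfalso
    apply h
    have h0 := (nnI_spec i).2.1
    refine ⟨by omega, ?_⟩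
    have ht : i.toNat = nnI i := by omega
    rw [ht]
    exact (nnI_spec i).2.2

theorem nnI_shift (i : ℤ) (h : ¬ (1 ≤ i ∧ NQ i.toNat = true)) : nnI (i + 1) = nnI i := by
  have hgt := nnI_gt i h
  obtain ⟨h0a, h0b, h0c⟩ := nnI_spec i
  obtain ⟨h1a, h1b, h1c⟩ := nnI_spec (i + 1)
  apply le_antisymm
  · exact nnI_min (i + 1) (nnI i) (by omega) h0b h0c
  · exact nnI_min i (nnI (i + 1)) (by omega) h1b h1c

theorem is_neq_false_cond (i : ℤ) (h : ¬ is_neq_number i = true) :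
    ¬ (1 ≤ i ∧ NQ i.toNat = true) := by
  rintro ⟨h1, h2⟩
  exact h ((is_neq_NQ i h1).mpr h2)

-- A's while-loop: `while count < k: if is_neq_number(i): count += 1; i += 1; return i-1`
def loopA (k count i : Int) : Int :=
  if h : count < k then
    if hn : is_neq_number i then loopA k (count + 1) (i + 1)
    else loopA k count (i + 1)
  else i - 1
termination_by ((k - count).toNat, ((nnI i : ℤ) - i).toNat)
decreasing_by
  · exact Prod.Lex.left _ _ (by omega)
  · have h2 := nnI_gt i (is_neq_false_cond i hn)
    have h3 := nnI_shift i (is_neq_false_cond i hn)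
    exact Prod.Lex.right' _ (by omega) (by omega)

def generate_neq_numbers (k : Int) : Int := loopA k 0 1

-- ===== PORT B =====
-- `while k > 9 ** L: k -= 9 ** L; L += 1`   (L ≥ 1 throughout, so L.toNat is exact)
def lenLoopB (k L : Int) : Int × Int :=
  if (9 : ℤ) ^ L.toNat < k then lenLoopB (k - 9 ^ L.toNat) (L + 1) else (k, L)
termination_by k.toNat
decreasing_by
  have : (1 : ℤ) ≤ 9 ^ L.toNat := one_le_pow₀ (by omega)
  omega

def generate_neq_numbers_alt (k : Int) : Int :=
  if k ≤ 0 then 0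
  else
    let r := lenLoopB k 1
    -- `for p in range(L-1, -1, -1): c, idx = divmod(idx, 9**p); d = c if c < prev else c+1; n = 10*n+d; prev = d`
    -- (p ≥ 0 on every iteration, so 9**p is ported as 9 ^ p.toNat)
    let st := (PySem.List.pyRange (r.2 - 1) (-1) (-1)).foldl
      (fun (s : Int × Int × Int) p =>
        let c := PySem.Int.floordiv s.1 ((9 : ℤ) ^ p.toNat)
        let m := PySem.Int.mod s.1 ((9 : ℤ) ^ p.toNat)
        let d := if c < s.2.2 then c else c + 1
        (m, 10 * s.2.1 + d, d))
      (r.1 - 1, 0, 0)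
    st.2.1

-- ===== PRECONDITION & SPEC =====
def Spec_generate_neq_numbers (k : Int) (out : Int) : Prop := out = generate_neq_numbers_alt k
instance (k : Int) (out : Int) : Decidable (Spec_generate_neq_numbers k out) := by unfold Spec_generate_neq_numbers; infer_instance

-- ===== CLAIM (what is proved, stated in full; the proofs are below) =====
def Claim_equal_generate_neq_numbers : Prop := ∀ (k : Int), Dom_generate_neq_numbers k → Spec_generate_neq_numbers k (generate_neq_numbers k)

-- ===== LEMMAS AND PROOFS =====

-- ---- the unranking map, mathematically ----
-- digit lists below are most-significant-first
def buildMS (prev : ℕ) : List ℕ → List ℕ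
  | [] => []
  | c :: cs => (if c < prev then c else c + 1) :: buildMS (if c < prev then c else c + 1) cs

def pad9 : ℕ → ℕ → List ℕ
  | 0, _ => []
  | ℓ + 1, idx => idx / 9 ^ ℓ :: pad9 ℓ (idx % 9 ^ ℓ)

def valMS (ds : List ℕ) : ℕ := Nat.ofDigits 10 ds.reverse

def uL (L idx : ℕ) : ℕ := valMS (buildMS 0 (pad9 L idx))

def uN (L k : ℕ) : ℕ :=
  if k ≤ 9 ^ L then uL L (k - 1) else uN (L + 1) (k - 9 ^ L)
termination_by k
decreasing_by
  have : (1 : ℕ) ≤ 9 ^ L := Nat.one_le_pow _ _ (by omega)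
  omega

def uu (k : ℕ) : ℕ := uN 1 k

-- ---- basic facts about buildMS / pad9 ----
theorem buildMS_cons (p c : ℕ) (cs : List ℕ) : buildMS p (c :: cs) =
    (if c < p then c else c + 1) :: buildMS (if c < p then c else c + 1) cs := rfl

theorem pad9_succ (ℓ idx : ℕ) : pad9 (ℓ + 1) idx = idx / 9 ^ ℓ :: pad9 ℓ (idx % 9 ^ ℓ) := rfl

theorem buildMS_length (cs : List ℕ) : ∀ p, (buildMS p cs).length = cs.length := by
  induction cs with
  | nil => intro p; rfl
  | cons c cs ih => intro p; rw [buildMS_cons, List.length_cons, List.length_cons, ih]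

theorem buildMS_lt10 (cs : List ℕ) : (∀ c ∈ cs, c < 9) →
    ∀ p, ∀ d ∈ buildMS p cs, d < 10 := by
  induction cs with
  | nil => intro _ p d hd; simp [buildMS] at hd
  | cons c cs ih =>
    intro hc p d hd
    rw [buildMS_cons] at hd
    rcases List.mem_cons.mp hd with h | h
    · have := hc c (List.mem_cons_self ..)
      split at h <;> omega
    · exact ih (fun x hx => hc x (List.mem_cons_of_mem _ hx)) _ d h

theorem buildMS_chain (cs : List ℕ) : ∀ p, (p :: buildMS p cs).IsChain (· ≠ ·) := by
  induction cs with
  | nil => intro p; simp [buildMS]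
  | cons c cs ih =>
    intro p
    rw [buildMS_cons, List.isChain_cons]
    refine ⟨?_, ih _⟩
    intro y hy
    simp at hy
    subst hy
    split <;> omega

theorem valMS_cons (d : ℕ) (t : List ℕ) : valMS (d :: t) = valMS t + 10 ^ t.length * d := by
  unfold valMS
  rw [List.reverse_cons, Nat.ofDigits_append]
  simp [Nat.ofDigits]

theorem valMS_lt (ds : List ℕ) : (∀ d ∈ ds, d < 10) → valMS ds < 10 ^ ds.length := by
  induction ds with
  | nil => intro _; simp [valMS]
  | cons d t ih =>
    intro h
    have h1 := ih (fun x hx => h x (List.mem_cons_of_mem _ hx))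
    have h2 := h d (List.mem_cons_self ..)
    rw [valMS_cons, List.length_cons, pow_succ]
    nlinarith [pow_pos (by norm_num : 0 < 10) t.length]

theorem valMS_ge (d : ℕ) (t : List ℕ) (hd : 1 ≤ d) :
    10 ^ t.length ≤ valMS (d :: t) := by
  rw [valMS_cons]
  nlinarith [pow_pos (by norm_num : 0 < 10) t.length]

theorem pad9_length (L : ℕ) : ∀ idx, (pad9 L idx).length = L := by
  induction L with
  | zero => intro idx; rfl
  | succ ℓ ih => intro idx; rw [pad9_succ, List.length_cons, ih]

theorem pad9_lt9 (L : ℕ) : ∀ idx, idx < 9 ^ L → ∀ c ∈ pad9 L idx, c < 9 := by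
  induction L with
  | zero => intro idx _ c hc; simp [pad9] at hc
  | succ ℓ ih =>
    intro idx hidx c hc
    rw [pad9_succ] at hc
    rcases List.mem_cons.mp hc with h | h
    · subst h
      rw [pow_succ] at hidx
      exact Nat.div_lt_of_lt_mul (by omega)
    · exact ih _ (Nat.mod_lt _ (pow_pos (by norm_num) ℓ)) c h

-- digits of an unranked number are exactly the built list
theorem digits_valMS (ds : List ℕ) (hne : ds ≠ []) (h10 : ∀ d ∈ ds, d < 10)
    (hh : ∀ x ∈ ds.head?, x ≠ 0) : Nat.digits 10 (valMS ds) = ds.reverse := by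
  unfold valMS
  apply Nat.digits_ofDigits 10 (by omega)
  · intro x hx
    exact h10 x (List.mem_reverse.mp hx)
  · intro hne'
    rw [List.getLast_reverse]
    apply hh
    simp [List.head?_eq_some_head hne]

-- decomposes uL for L = ℓ+1 : the built list is nonempty with positive head
theorem uL_decomp (ℓ idx : ℕ) :
    buildMS 0 (pad9 (ℓ + 1) idx) =
      (idx / 9 ^ ℓ + 1) :: buildMS (idx / 9 ^ ℓ + 1) (pad9 ℓ (idx % 9 ^ ℓ)) := by
  rw [pad9_succ, buildMS_cons]
  simp

theorem uL_ge (L idx : ℕ) (hL : 1 ≤ L) : 10 ^ (L - 1) ≤ uL L idx := by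
  obtain ⟨ℓ, rfl⟩ : ∃ ℓ, L = ℓ + 1 := ⟨L - 1, by omega⟩
  unfold uL
  rw [uL_decomp]
  have h := valMS_ge (idx / 9 ^ ℓ + 1)
    (buildMS (idx / 9 ^ ℓ + 1) (pad9 ℓ (idx % 9 ^ ℓ))) (Nat.succ_le_succ (Nat.zero_le _))
  rw [buildMS_length, pad9_length] at h
  simpa using h

theorem uL_val_lt (ℓ p idx : ℕ) (h : idx < 9 ^ ℓ) :
    valMS (buildMS p (pad9 ℓ idx)) < 10 ^ ℓ := by
  have h2 := valMS_lt (buildMS p (pad9 ℓ idx)) (buildMS_lt10 _ (pad9_lt9 ℓ idx h) p)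
  rwa [buildMS_length, pad9_length] at h2

theorem uL_NQ (L idx : ℕ) (hL : 1 ≤ L) (hidx : idx < 9 ^ L) :
    0 < uL L idx ∧ NQ (uL L idx) = true := by
  obtain ⟨ℓ, rfl⟩ : ∃ ℓ, L = ℓ + 1 := ⟨L - 1, by omega⟩
  constructor
  · have h1 := uL_ge (ℓ + 1) idx (by omega)
    have h2 := pow_pos (by norm_num : 0 < 10) (ℓ + 1 - 1)
    omega
  · unfold NQ
    rw [decide_eq_true_iff]
    unfold uL
    have h10 : ∀ d ∈ buildMS 0 (pad9 (ℓ + 1) idx), d < 10 :=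
      buildMS_lt10 _ (pad9_lt9 _ _ hidx) 0
    have hne : buildMS 0 (pad9 (ℓ + 1) idx) ≠ [] := by rw [uL_decomp]; simp
    have hh : ∀ x ∈ (buildMS 0 (pad9 (ℓ + 1) idx)).head?, x ≠ 0 := by rw [uL_decomp]; simp
    rw [digits_valMS _ hne h10 hh, List.isChain_reverse]
    have hc := (List.isChain_cons.mp (buildMS_chain (pad9 (ℓ + 1) idx) 0)).2
    exact List.isChain_iff_getElem.mpr
      (fun i hi he => (List.isChain_iff_getElem.mp hc i hi) he.symm)

theorem uL_lt (L idx : ℕ) (hidx : idx < 9 ^ L) : uL L idx < 10 ^ L := by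
  unfold uL
  have h := valMS_lt (buildMS 0 (pad9 L idx)) (buildMS_lt10 _ (pad9_lt9 _ _ hidx) 0)
  rwa [buildMS_length, pad9_length] at h

-- strict monotonicity of unranking within one length
theorem buildMS_map_mono (p c c' : ℕ) (h : c < c') :
    (if c < p then c else c + 1) < (if c' < p then c' else c' + 1) := by
  split_ifs <;> omega

theorem uL_mono (L : ℕ) : ∀ p idx idx', idx < idx' → idx' < 9 ^ L →
    valMS (buildMS p (pad9 L idx)) < valMS (buildMS p (pad9 L idx')) := by
  induction L with
  | zero =>
    intro p idx idx' h h'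
    simp at h'
    omega
  | succ ℓ ih =>
    intro p idx idx' h h'
    have hq : idx / 9 ^ ℓ ≤ idx' / 9 ^ ℓ := Nat.div_le_div_right (le_of_lt h)
    rw [pad9_succ, pad9_succ, buildMS_cons, buildMS_cons, valMS_cons, valMS_cons]
    rw [buildMS_length, pad9_length, buildMS_length, pad9_length]
    have hb := uL_val_lt ℓ (if idx / 9 ^ ℓ < p then idx / 9 ^ ℓ else idx / 9 ^ ℓ + 1)
      (idx % 9 ^ ℓ) (Nat.mod_lt _ (pow_pos (by norm_num) ℓ))
    rcases Nat.lt_or_eq_of_le hq with hlt | heq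
    · have hd := buildMS_map_mono p _ _ hlt
      have hb' := uL_val_lt ℓ (if idx' / 9 ^ ℓ < p then idx' / 9 ^ ℓ else idx' / 9 ^ ℓ + 1)
        (idx' % 9 ^ ℓ) (Nat.mod_lt _ (pow_pos (by norm_num) ℓ))
      nlinarith [pow_pos (by norm_num : 0 < 10) ℓ]
    · rw [heq]
      have hr : idx % 9 ^ ℓ < idx' % 9 ^ ℓ := by
        have h1 := Nat.div_add_mod idx (9 ^ ℓ)
        have h2 := Nat.div_add_mod idx' (9 ^ ℓ)
        rw [heq] at h1
        omega
      have := ih (if idx' / 9 ^ ℓ < p then idx' / 9 ^ ℓ else idx' / 9 ^ ℓ + 1)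
        _ _ hr (Nat.mod_lt _ (pow_pos (by norm_num) ℓ))
      exact Nat.add_lt_add_right this _

-- ---- surjectivity: every NQ number is unranked from some index ----
def invMS (p : ℕ) : List ℕ → List ℕ
  | [] => []
  | d :: t => (if d < p then d else d - 1) :: invMS d t

def val9 (cs : List ℕ) : ℕ := Nat.ofDigits 9 cs.reverse

theorem invMS_cons (p d : ℕ) (t : List ℕ) :
    invMS p (d :: t) = (if d < p then d else d - 1) :: invMS d t := rfl

theorem invMS_length (ds : List ℕ) : ∀ p, (invMS p ds).length = ds.length := by
  induction ds with
  | nil => intro p; rfl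
  | cons d t ih => intro p; rw [invMS_cons, List.length_cons, List.length_cons, ih]

theorem invMS_lt9 (ds : List ℕ) : ∀ p, p < 10 → (∀ d ∈ ds, d < 10) →
    (p :: ds).IsChain (· ≠ ·) → ∀ c ∈ invMS p ds, c < 9 := by
  induction ds with
  | nil => intro p _ _ _ c hc; simp [invMS] at hc
  | cons d t ih =>
    intro p hp h10 hch c hc
    have hd10 := h10 d (List.mem_cons_self ..)
    have hne : p ≠ d := by
      have := (List.isChain_cons.mp hch).1
      simp at this
      exact this
    rw [invMS_cons] at hc
    rcases List.mem_cons.mp hc with h | h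
    · split at h <;> omega
    · exact ih d hd10 (fun x hx => h10 x (List.mem_cons_of_mem _ hx))
        (List.isChain_cons.mp hch).2 c h

theorem buildMS_invMS (ds : List ℕ) : ∀ p, (∀ d ∈ ds, d < 10) →
    (p :: ds).IsChain (· ≠ ·) → buildMS p (invMS p ds) = ds := by
  induction ds with
  | nil => intro p _ _; rfl
  | cons d t ih =>
    intro p h10 hch
    have hne : p ≠ d := by
      have := (List.isChain_cons.mp hch).1
      simp at this
      exact this
    rw [invMS_cons, buildMS_cons]
    have hmap : (if (if d < p then d else d - 1) < p then (if d < p then d else d - 1)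
        else (if d < p then d else d - 1) + 1) = d := by
      split_ifs <;> omega
    rw [hmap]
    rw [ih d (fun x hx => h10 x (List.mem_cons_of_mem _ hx)) (List.isChain_cons.mp hch).2]

theorem val9_cons (c : ℕ) (t : List ℕ) : val9 (c :: t) = val9 t + 9 ^ t.length * c := by
  unfold val9
  rw [List.reverse_cons, Nat.ofDigits_append]
  simp [Nat.ofDigits]

theorem val9_lt (cs : List ℕ) : (∀ c ∈ cs, c < 9) → val9 cs < 9 ^ cs.length := by
  induction cs with
  | nil => intro _; simp [val9]
  | cons c t ih =>
    intro h
    have h1 := ih (fun x hx => h x (List.mem_cons_of_mem _ hx))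
    have h2 := h c (List.mem_cons_self ..)
    rw [val9_cons, List.length_cons, pow_succ]
    nlinarith [pow_pos (by norm_num : 0 < 9) t.length]

theorem pad9_val9 (cs : List ℕ) : (∀ c ∈ cs, c < 9) → pad9 cs.length (val9 cs) = cs := by
  induction cs with
  | nil => intro _; rfl
  | cons c t ih =>
    intro h
    have hlt := val9_lt t (fun x hx => h x (List.mem_cons_of_mem _ hx))
    rw [List.length_cons, pad9_succ, val9_cons]
    have hdiv : (val9 t + 9 ^ t.length * c) / 9 ^ t.length = c := by
      rw [Nat.add_mul_div_left _ _ (pow_pos (by norm_num) t.length)]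
      rw [Nat.div_eq_of_lt hlt]
      omega
    have hmod : (val9 t + 9 ^ t.length * c) % 9 ^ t.length = val9 t := by
      rw [Nat.add_mul_mod_self_left]
      exact Nat.mod_eq_of_lt hlt
    rw [hdiv, hmod, ih (fun x hx => h x (List.mem_cons_of_mem _ hx))]

theorem uL_surj (n : ℕ) (hn : 0 < n) (hq : NQ n = true) :
    ∃ L, 1 ≤ L ∧ ∃ idx, idx < 9 ^ L ∧ uL L idx = n := by
  have hds : Nat.digits 10 n ≠ [] := Nat.digits_ne_nil_iff_ne_zero.mpr (by omega)
  set ds := (Nat.digits 10 n).reverse with hdsdef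
  have hne : ds ≠ [] := by simpa [hdsdef] using hds
  have h10 : ∀ d ∈ ds, d < 10 := by
    intro d hd
    exact Nat.digits_lt_base (by norm_num) (List.mem_reverse.mp hd)
  have hch0 : (0 :: ds).IsChain (· ≠ ·) := by
    rw [List.isChain_cons]
    constructor
    · intro y hy
      rw [List.head?_eq_some_head hne] at hy
      simp at hy
      subst hy
      have hgr : ds.head hne = (Nat.digits 10 n).getLast hds := by
        simp [hdsdef, List.head_reverse]
      rw [hgr]
      exact fun h0 => Nat.getLast_digit_ne_zero 10 (by omega) h0.symm
    · unfold NQ at hq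
      rw [decide_eq_true_iff] at hq
      rw [hdsdef, List.isChain_reverse]
      exact List.isChain_iff_getElem.mpr
        (fun i hi he => (List.isChain_iff_getElem.mp hq i hi) he.symm)
  have hcs9 : ∀ c ∈ invMS 0 ds, c < 9 := invMS_lt9 ds 0 (by omega) h10 hch0
  refine ⟨ds.length, ?_, val9 (invMS 0 ds), ?_, ?_⟩
  · have := List.length_pos_iff.mpr hne
    omega
  · have := val9_lt (invMS 0 ds) hcs9
    rwa [invMS_length] at this
  · unfold uL
    have hlen : ds.length = (invMS 0 ds).length := (invMS_length ds 0).symm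
    rw [hlen, pad9_val9 (invMS 0 ds) hcs9, buildMS_invMS ds 0 h10 hch0]
    unfold valMS
    rw [hdsdef, List.reverse_reverse, Nat.ofDigits_digits]

-- ---- facts about uN / uu ----
theorem uN_low (L k : ℕ) (h : k ≤ 9 ^ L) : uN L k = uL L (k - 1) := by
  rw [uN, if_pos h]

theorem uN_high (L k : ℕ) (h : 9 ^ L < k) : uN L k = uN (L + 1) (k - 9 ^ L) := by
  rw [uN, if_neg (by omega)]

theorem uN_mono (k : ℕ) : ∀ L, 1 ≤ k → 1 ≤ L → uN L k < uN L (k + 1) := by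
  induction k using Nat.strong_induction_on with
  | _ k ih =>
    intro L hk hL
    have h9 : 1 ≤ 9 ^ L := Nat.one_le_pow _ _ (by norm_num)
    by_cases h1 : k + 1 ≤ 9 ^ L
    · rw [uN_low L k (by omega), uN_low L (k + 1) h1]
      show valMS _ < valMS _
      have := uL_mono L 0 (k - 1) (k + 1 - 1) (by omega) (by omega)
      simpa using this
    · by_cases h2 : k ≤ 9 ^ L
      · have hk9 : k = 9 ^ L := by omega
        rw [uN_low L k h2, uN_high L (k + 1) (by omega)]
        have h3 : k + 1 - 9 ^ L = 1 := by omega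
        rw [h3, uN_low (L + 1) 1 (Nat.one_le_pow _ _ (by norm_num))]
        have ha := uL_lt L (k - 1) (by omega)
        have hb := uL_ge (L + 1) (1 - 1) (by omega)
        simp only [Nat.add_sub_cancel] at hb
        omega
      · rw [uN_high L k (by omega), uN_high L (k + 1) (by omega)]
        have h3 : k + 1 - 9 ^ L = (k - 9 ^ L) + 1 := by omega
        rw [h3]
        exact ih (k - 9 ^ L) (by omega) (L + 1) (by omega) (by omega)

theorem uN_NQ (k : ℕ) : ∀ L, 1 ≤ k → 1 ≤ L → 0 < uN L k ∧ NQ (uN L k) = true := by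
  induction k using Nat.strong_induction_on with
  | _ k ih =>
    intro L hk hL
    have h9 : 1 ≤ 9 ^ L := Nat.one_le_pow _ _ (by norm_num)
    by_cases h1 : k ≤ 9 ^ L
    · rw [uN_low L k h1]
      exact uL_NQ L (k - 1) hL (by omega)
    · rw [uN_high L k (by omega)]
      exact ih (k - 9 ^ L) (by omega) (L + 1) (by omega) (by omega)

theorem uN_surj_aux (L idx : ℕ) (hidx : idx < 9 ^ L) :
    ∀ (m L' : ℕ), L' + m = L → 1 ≤ L' → ∃ k, 1 ≤ k ∧ uN L' k = uL L idx := by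
  intro m
  induction m with
  | zero =>
    intro L' hL' h1
    refine ⟨idx + 1, by omega, ?_⟩
    have : L' = L := by omega
    subst this
    rw [uN_low L' (idx + 1) (by omega)]
    simp
  | succ m ih =>
    intro L' hL' h1
    obtain ⟨k, hk, he⟩ := ih (L' + 1) (by omega) (by omega)
    have h9 : 1 ≤ 9 ^ L' := Nat.one_le_pow _ _ (by norm_num)
    refine ⟨9 ^ L' + k, by omega, ?_⟩
    rw [uN_high L' (9 ^ L' + k) (by omega)]
    rw [Nat.add_sub_cancel_left]
    exact he

theorem uN_surj (L idx : ℕ) (hL : 1 ≤ L) (hidx : idx < 9 ^ L) :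
    ∃ k, 1 ≤ k ∧ uu k = uL L idx := by
  obtain ⟨k, hk, he⟩ := uN_surj_aux L idx hidx (L - 1) 1 (by omega) le_rfl
  exact ⟨k, hk, he⟩

theorem uu_mono (j k : ℕ) (hj : 1 ≤ j) (hjk : j < k) : uu j < uu k := by
  induction k with
  | zero => omega
  | succ k ih =>
    by_cases h : j = k
    · subst h
      exact uN_mono j 1 hj le_rfl
    · have h1 := ih (by omega)
      have h2 := uN_mono k 1 (by omega) le_rfl
      have h3 : uu k < uu (k + 1) := h2
      omega

theorem uu_NQ (k : ℕ) (hk : 1 ≤ k) : 0 < uu k ∧ NQ (uu k) = true :=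
  uN_NQ k 1 hk le_rfl

theorem uu_surj (n : ℕ) (hn : 0 < n) (hq : NQ n = true) : ∃ k, 1 ≤ k ∧ uu k = n := by
  obtain ⟨L, hL, idx, hidx, he⟩ := uL_surj n hn hq
  obtain ⟨k, hk, he'⟩ := uN_surj L idx hL hidx
  exact ⟨k, hk, by rw [he', he]⟩

-- ---- uu is exactly the "next NQ number" iteration that A's loop performs ----
theorem uu_one : uu 1 = nnI 1 := by
  obtain ⟨hp, hq⟩ := uu_NQ 1 le_rfl
  apply le_antisymm
  · obtain ⟨ha, hb, hc⟩ := nnI_spec 1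
    obtain ⟨j, hj, he⟩ := uu_surj (nnI 1) hb hc
    rcases Nat.eq_or_lt_of_le hj with h | h
    · rw [← h] at he
      omega
    · have := uu_mono 1 j le_rfl h
      omega
  · exact nnI_min 1 (uu 1) (by exact_mod_cast hp) hp hq

theorem uu_succ (k : ℕ) (hk : 1 ≤ k) : uu (k + 1) = nnI ((uu k : ℤ) + 1) := by
  obtain ⟨hp, hq⟩ := uu_NQ (k + 1) (by omega)
  have hmono := uu_mono k (k + 1) hk (by omega)
  apply le_antisymm
  · obtain ⟨ha, hb, hc⟩ := nnI_spec ((uu k : ℤ) + 1)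
    obtain ⟨j, hj, he⟩ := uu_surj (nnI ((uu k : ℤ) + 1)) hb hc
    have hjk : k < j := by
      by_contra hle
      have : uu j ≤ uu k := by
        rcases Nat.eq_or_lt_of_le (by omega : j ≤ k) with h | h
        · rw [h]
        · exact le_of_lt (uu_mono j k hj h)
      omega
    rcases Nat.eq_or_lt_of_le (by omega : k + 1 ≤ j) with h | h
    · rw [h]
      omega
    · have := uu_mono (k + 1) j (by omega) h
      omega
  · exact nnI_min _ (uu (k + 1)) (by exact_mod_cast hmono) hp hq

-- ---- A's loop computes uu ----
theorem nnI_fix (i : ℤ) (hi : 1 ≤ i) (hq : NQ i.toNat = true) : (nnI i : ℤ) = i := by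
  have h1 := nnI_ge i
  have h2 := nnI_min i i.toNat (Int.self_le_toNat i) (by omega) hq
  omega

theorem loopA_eq (k : ℤ) : ∀ (count i : ℤ), 0 ≤ count → count ≤ k → 1 ≤ i →
    (count < k → nnI i = uu (count.toNat + 1)) →
    (count = k → i - 1 = (uu k.toNat : ℤ)) →
    loopA k count i = (uu k.toNat : ℤ) := by
  intro count i
  induction count, i using loopA.induct k with
  | case1 count i hck hneq ih =>
    intro h0 h1 h2 h3 h4
    rw [loopA, dif_pos hck, dif_pos hneq]
    have hq : NQ i.toNat = true := (is_neq_NQ i h2).mp hneq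
    have hfix : (nnI i : ℤ) = i := nnI_fix i h2 hq
    have h3' := h3 hck
    apply ih
    · omega
    · omega
    · omega
    · intro hlt
      have hs : uu ((count + 1).toNat + 1) = nnI ((uu (count.toNat + 1) : ℤ) + 1) := by
        have he : (count + 1).toNat + 1 = (count.toNat + 1) + 1 := by omega
        rw [he]
        exact uu_succ (count.toNat + 1) (by omega)
      rw [hs, ← h3']
      congr 1
      omega
    · intro heq
      have : k.toNat = count.toNat + 1 := by omega
      rw [this, ← h3']
      omega
  | case2 count i hck hneq ih =>
    intro h0 h1 h2 h3 h4
    rw [loopA, dif_pos hck, dif_neg hneq]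
    have hcond := is_neq_false_cond i (by simpa using hneq)
    have hsh := nnI_shift i hcond
    apply ih
    · omega
    · omega
    · omega
    · intro hlt
      rw [hsh]
      exact h3 hlt
    · intro heq
      omega
  | case3 count i hck =>
    intro h0 h1 h2 h3 h4
    rw [loopA, dif_neg hck]
    exact h4 (by omega)

theorem portA_eq (k : ℤ) (hk : 1 ≤ k) : generate_neq_numbers k = (uu k.toNat : ℤ) := by
  apply loopA_eq k 0 1 le_rfl (by omega) le_rfl
  · intro _
    simpa using uu_one.symm
  · intro h
    omega

-- ---- B's port computes uu ----
theorem lenLoopB_eq (k : ℤ) : ∀ L : ℤ, 1 ≤ k → 1 ≤ L →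
    1 ≤ (lenLoopB k L).1 ∧ 1 ≤ (lenLoopB k L).2 ∧
    (lenLoopB k L).1 ≤ (9 : ℤ) ^ (lenLoopB k L).2.toNat ∧
    uN L.toNat k.toNat = uL (lenLoopB k L).2.toNat ((lenLoopB k L).1.toNat - 1) := by
  intro L
  induction k, L using lenLoopB.induct with
  | case1 k L hlt ih =>
    intro hk hL
    have hcast : ((9 ^ L.toNat : ℕ) : ℤ) = (9 : ℤ) ^ L.toNat := by push_cast; ring
    have h9 : (1 : ℤ) ≤ (9 : ℤ) ^ L.toNat := one_le_pow₀ (by omega)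
    have hrec : lenLoopB k L = lenLoopB (k - 9 ^ L.toNat) (L + 1) := by
      rw [lenLoopB, if_pos hlt]
    obtain ⟨a1, a2, a3, a4⟩ := ih (by omega) (by omega)
    rw [hrec]
    refine ⟨a1, a2, a3, ?_⟩
    have hstep : uN L.toNat k.toNat = uN (L.toNat + 1) (k.toNat - 9 ^ L.toNat) := by
      apply uN_high
      have h1 : ((9 ^ L.toNat : ℕ) : ℤ) < (k.toNat : ℤ) := by rw [hcast]; omega
      exact_mod_cast h1
    have he1 : (L + 1).toNat = L.toNat + 1 := by omega
    have he2 : (k - 9 ^ L.toNat).toNat = k.toNat - 9 ^ L.toNat := by omega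
    rw [hstep, ← he1, ← he2]
    exact a4
  | case2 k L hlt =>
    intro hk hL
    have hend : lenLoopB k L = (k, L) := by
      rw [lenLoopB, if_neg hlt]
    rw [hend]
    refine ⟨hk, hL, by simpa using hlt, ?_⟩
    apply uN_low
    have hcast : ((9 ^ L.toNat : ℕ) : ℤ) = (9 : ℤ) ^ L.toNat := by push_cast; ring
    have h1 : (k.toNat : ℤ) ≤ ((9 ^ L.toNat : ℕ) : ℤ) := by rw [hcast]; omega
    exact_mod_cast h1

theorem foldB_eq (L : ℕ) : ∀ (idx n prev : ℕ), idx < 9 ^ L →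
    ((PySem.List.pyRange ((L : ℤ) - 1) (-1) (-1)).foldl
      (fun (s : Int × Int × Int) p =>
        let c := PySem.Int.floordiv s.1 ((9 : ℤ) ^ p.toNat)
        let m := PySem.Int.mod s.1 ((9 : ℤ) ^ p.toNat)
        let d := if c < s.2.2 then c else c + 1
        (m, 10 * s.2.1 + d, d))
      ((idx : ℤ), (n : ℤ), (prev : ℤ))).2.1
    = ((n * 10 ^ L + valMS (buildMS prev (pad9 L idx)) : ℕ) : ℤ) := by
  induction L with
  | zero =>
    intro idx n prev _
    rw [show ((0 : ℕ) : ℤ) - 1 = -1 by norm_num]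
    rw [PySem.List.pyRange_neg_one_eq_nil (by norm_num)]
    show (n : ℤ) = _
    have : valMS (buildMS prev (pad9 0 idx)) = 0 := by
      show valMS [] = 0
      simp [valMS]
    rw [this]
    push_cast
    ring
  | succ ℓ ih =>
    intro idx n prev h
    set dN := if idx / 9 ^ ℓ < prev then idx / 9 ^ ℓ else idx / 9 ^ ℓ + 1 with hdN
    have hb : ((ℓ + 1 : ℕ) : ℤ) - 1 = (ℓ : ℤ) := by push_cast; ring
    rw [hb, PySem.List.pyRange_neg_one_cons (by omega : (-1 : ℤ) < (ℓ : ℤ))]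
    rw [List.foldl_cons]
    have h9 : (9 : ℤ) ^ ((ℓ : ℤ)).toNat = ((9 ^ ℓ : ℕ) : ℤ) := by
      rw [Int.toNat_natCast]
      push_cast
      ring
    have hfd : PySem.Int.floordiv (idx : ℤ) ((9 : ℤ) ^ ((ℓ : ℤ)).toNat) = ((idx / 9 ^ ℓ : ℕ) : ℤ) := by
      rw [h9]
      exact PySem.Int.floordiv_natCast idx (9 ^ ℓ)
    have hmd : PySem.Int.mod (idx : ℤ) ((9 : ℤ) ^ ((ℓ : ℤ)).toNat) = ((idx % 9 ^ ℓ : ℕ) : ℤ) := by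
      rw [h9]
      exact PySem.Int.mod_natCast idx (9 ^ ℓ)
    have hd : (if ((idx / 9 ^ ℓ : ℕ) : ℤ) < (prev : ℤ) then ((idx / 9 ^ ℓ : ℕ) : ℤ)
        else ((idx / 9 ^ ℓ : ℕ) : ℤ) + 1) = ((dN : ℕ) : ℤ) := by
      rw [hdN]
      by_cases hx : idx / 9 ^ ℓ < prev
      · rw [if_pos (by exact_mod_cast hx), if_pos hx]
      · rw [if_neg (by exact_mod_cast hx), if_neg hx]
        push_cast
        ring
    refine Eq.trans (congrArg (fun z : Int × Int × Int => (List.foldl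
        (fun (s : Int × Int × Int) p =>
          let c := PySem.Int.floordiv s.1 ((9 : ℤ) ^ p.toNat)
          let m := PySem.Int.mod s.1 ((9 : ℤ) ^ p.toNat)
          let d := if c < s.2.2 then c else c + 1
          (m, 10 * s.2.1 + d, d)) z (PySem.List.pyRange ((ℓ : ℤ) - 1) (-1) (-1))).2.1) ?_)
      (Eq.trans (ih (idx % 9 ^ ℓ) (10 * n + dN) dN (Nat.mod_lt _ (pow_pos (by norm_num) ℓ))) ?_)
    · show ((PySem.Int.mod (idx : ℤ) ((9 : ℤ) ^ (((ℓ : ℕ) : ℤ)).toNat) : ℤ),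
          10 * (n : ℤ) + (if PySem.Int.floordiv (idx : ℤ) ((9 : ℤ) ^ (((ℓ : ℕ) : ℤ)).toNat) < (prev : ℤ)
            then PySem.Int.floordiv (idx : ℤ) ((9 : ℤ) ^ (((ℓ : ℕ) : ℤ)).toNat)
            else PySem.Int.floordiv (idx : ℤ) ((9 : ℤ) ^ (((ℓ : ℕ) : ℤ)).toNat) + 1),
          (if PySem.Int.floordiv (idx : ℤ) ((9 : ℤ) ^ (((ℓ : ℕ) : ℤ)).toNat) < (prev : ℤ)
            then PySem.Int.floordiv (idx : ℤ) ((9 : ℤ) ^ (((ℓ : ℕ) : ℤ)).toNat)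
            else PySem.Int.floordiv (idx : ℤ) ((9 : ℤ) ^ (((ℓ : ℕ) : ℤ)).toNat) + 1))
        = (((idx % 9 ^ ℓ : ℕ) : ℤ), ((10 * n + dN : ℕ) : ℤ), ((dN : ℕ) : ℤ))
      rw [hfd, hmd, hd]
      push_cast
      rfl
    · rw [pad9_succ, buildMS_cons, ← hdN, valMS_cons, buildMS_length, pad9_length]
      push_cast
      ring

theorem portB_eq (k : ℤ) (hk : 1 ≤ k) : generate_neq_numbers_alt k = (uu k.toNat : ℤ) := by
  obtain ⟨a1, a2, a3, a4⟩ := lenLoopB_eq k 1 hk le_rfl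
  have hc9 : ((9 ^ (lenLoopB k 1).2.toNat : ℕ) : ℤ) = (9 : ℤ) ^ (lenLoopB k 1).2.toNat := by
    push_cast
    ring
  have hb : (lenLoopB k 1).1.toNat - 1 < 9 ^ (lenLoopB k 1).2.toNat := by
    omega
  rw [generate_neq_numbers_alt, if_neg (by omega)]
  simp only []
  have e1 : (lenLoopB k 1).1 - 1 = (((lenLoopB k 1).1.toNat - 1 : ℕ) : ℤ) := by
    push_cast
    omega
  have e2 : (lenLoopB k 1).2 - 1 = (((lenLoopB k 1).2.toNat : ℕ) : ℤ) - 1 := by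
    omega
  rw [e1, e2]
  refine Eq.trans (foldB_eq (lenLoopB k 1).2.toNat ((lenLoopB k 1).1.toNat - 1) 0 0 hb) ?_
  have ha4 : uN 1 k.toNat = uL (lenLoopB k 1).2.toNat ((lenLoopB k 1).1.toNat - 1) := by
    simpa using a4
  show (((0 * 10 ^ (lenLoopB k 1).2.toNat +
      valMS (buildMS 0 (pad9 (lenLoopB k 1).2.toNat ((lenLoopB k 1).1.toNat - 1))) : ℕ)) : ℤ) = _
  rw [Nat.zero_mul, Nat.zero_add]
  show ((uL (lenLoopB k 1).2.toNat ((lenLoopB k 1).1.toNat - 1) : ℕ) : ℤ) = _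
  rw [← ha4]
  rfl

-- ===== VERDICT (by name: the statement is the Claim_ definition above) =====
theorem generate_neq_numbers_spec : Claim_equal_generate_neq_numbers := by
  intro k _
  unfold Spec_generate_neq_numbers
  by_cases hk : k ≤ 0
  · have hA : generate_neq_numbers k = 0 := by
      rw [generate_neq_numbers, loopA]
      simp [show ¬ (0 < k) by omega]
    have hB : generate_neq_numbers_alt k = 0 := by
      rw [generate_neq_numbers_alt, if_pos hk]
    rw [hA, hB]
  · rw [portA_eq k (by omega), portB_eq k (by omega)]
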